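-- pv_equiv track=rewrite | github.com/Rasitefe/zombie-game | zombie_oyunu.py | get_entities_from_grid
-- ===== SOURCE A (Python) =====
-- ZOMBIE = 3
--
-- START = 4
--
-- END = 5
--
-- def get_entities_from_grid(grid, cell_size):
--     zombies = []
--     start = None
--     end = None
--     grid_size = len(grid)
--     for y in range(grid_size):
--         for x in range(grid_size):
--             cell = grid[y][x]
--             cx = x * cell_size + cell_size // 2
--             cy = y * cell_size + cell_size // 2
--             if cell == ZOMBIE:
--                 zombies.append((cx, cy))
--             elif cell == START:
--                 start = (cx, cy)
--             elif cell == END: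
--                 end = (cx, cy)
--     return zombies, start, end
-- ===== SOURCE B (Python) =====
-- ZOMBIE = 3
--
-- START = 4
--
-- END = 5
--
-- def get_entities_from_grid(grid, cell_size):
--     n = len(grid)
--     half = cell_size // 2
--     zombies = [(x * cell_size + half, y * cell_size + half)
--                for y in range(n) for x in range(n) if grid[y][x] == ZOMBIE]
--
--     def find_last(value):
--         # first match scanning the grid backwards = A's last-overwrite
--         return next(((x * cell_size + half, y * cell_size + half)
--                      for y in reversed(range(n)) for x in reversed(range(n))
--                      if grid[y][x] == value), None)
--
--     return zombies, find_last(START), find_last(END)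
-- ===== Notes on version B (the rewrite author's own statement) =====
-- stated objective: alternative
-- what changed: Replaces A's single forward scan with overwriting state by three independent queries: one comprehension collecting zombie centers, and for start/end an early-terminating backward search (next over the grid traversed in reverse) that returns the first match instead of overwriting to the last.
import Mathlib
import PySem

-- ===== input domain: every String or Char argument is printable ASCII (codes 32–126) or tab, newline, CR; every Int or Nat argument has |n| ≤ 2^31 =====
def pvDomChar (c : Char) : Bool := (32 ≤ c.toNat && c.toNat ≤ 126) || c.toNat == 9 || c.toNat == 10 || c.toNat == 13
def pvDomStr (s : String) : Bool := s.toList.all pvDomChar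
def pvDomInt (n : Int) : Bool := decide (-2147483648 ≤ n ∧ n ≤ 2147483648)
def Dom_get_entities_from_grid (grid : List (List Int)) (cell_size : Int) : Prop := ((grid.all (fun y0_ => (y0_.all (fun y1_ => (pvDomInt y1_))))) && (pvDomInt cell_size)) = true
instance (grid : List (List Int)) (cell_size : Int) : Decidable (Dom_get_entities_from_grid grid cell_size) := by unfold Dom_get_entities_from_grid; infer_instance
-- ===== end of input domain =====

-- B answers the three queries independently: a comprehension collects zombie centers and start/end
-- are found by an early-exit backward search (first match in reverse scan order) instead of A's
-- single forward scan that overwrites state; Pre_ excludes jagged grids on which Python A raises.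


-- ===== PORT A =====
-- grid[y][x] is ported as pyGetD with default 0 ([] for the row): inside Pre_ both indices are in
-- range so the default is never used; outside Pre_ Python A raises (those inputs are excluded).
def get_entities_from_grid (grid : List (List Int)) (cell_size : Int) : (List (Int × Int)) × (Option (Int × Int)) × (Option (Int × Int)) :=
  let grid_size : Int := grid.length
  (PySem.List.pyRange 0 grid_size 1).foldl (fun st y =>
    (PySem.List.pyRange 0 grid_size 1).foldl (fun st x =>
      let cell := PySem.List.pyGetD (PySem.List.pyGetD grid y []) x 0
      let cx := x * cell_size + PySem.Int.floordiv cell_size 2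
      let cy := y * cell_size + PySem.Int.floordiv cell_size 2
      if cell = 3 then (st.1 ++ [(cx, cy)], st.2.1, st.2.2)
      else if cell = 4 then (st.1, some (cx, cy), st.2.2)
      else if cell = 5 then (st.1, st.2.1, some (cx, cy))
      else st) st) ([], none, none)

-- ===== PORT B =====
-- find_last: next over a generator scanning the grid in reverse = head? of the reversed-order match list
def pvFindLast (grid : List (List Int)) (cell_size n half v : Int) : Option (Int × Int) :=
  ((PySem.List.pyRange 0 n 1).reverse.flatMap (fun y =>
    ((PySem.List.pyRange 0 n 1).reverse.filter
        (fun x => PySem.List.pyGetD (PySem.List.pyGetD grid y []) x 0 == v)).map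
      (fun x => (x * cell_size + half, y * cell_size + half)))).head?

def get_entities_from_grid_alt (grid : List (List Int)) (cell_size : Int) : (List (Int × Int)) × (Option (Int × Int)) × (Option (Int × Int)) :=
  let n : Int := grid.length
  let half := PySem.Int.floordiv cell_size 2
  let zombies := (PySem.List.pyRange 0 n 1).flatMap (fun y =>
    ((PySem.List.pyRange 0 n 1).filter
        (fun x => PySem.List.pyGetD (PySem.List.pyGetD grid y []) x 0 == 3)).map
      (fun x => (x * cell_size + half, y * cell_size + half)))
  (zombies, pvFindLast grid cell_size n half 4, pvFindLast grid cell_size n half 5)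

-- ===== PRECONDITION & SPEC =====
-- Pre_ excludes exactly the jagged grids: some row among the first len(grid) rows is shorter than
-- len(grid), so Python A's grid[y][x] raises IndexError there (and B raises there too).
def Pre_get_entities_from_grid (grid : List (List Int)) (cell_size : Int) : Prop :=
  ∀ row ∈ grid, grid.length ≤ row.length
instance (grid : List (List Int)) (cell_size : Int) : Decidable (Pre_get_entities_from_grid grid cell_size) := by unfold Pre_get_entities_from_grid; infer_instance

def pvWitness_get_entities_from_grid : List (List Int) × Int := ([[3, 4], [5, 0]], 10)

def Spec_get_entities_from_grid (grid : List (List Int)) (cell_size : Int) (out : (List (Int × Int)) × (Option (Int × Int)) × (Option (Int × Int))) : Prop := out = get_entities_from_grid_alt grid cell_size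
instance (grid : List (List Int)) (cell_size : Int) (out : (List (Int × Int)) × (Option (Int × Int)) × (Option (Int × Int))) : Decidable (Spec_get_entities_from_grid grid cell_size out) := by unfold Spec_get_entities_from_grid; infer_instance

-- ===== CLAIM (what is proved, stated in full; the proofs are below) =====
def Claim_equal_get_entities_from_grid : Prop := ∀ (grid : List (List Int)) (cell_size : Int), Dom_get_entities_from_grid grid cell_size → Pre_get_entities_from_grid grid cell_size → Spec_get_entities_from_grid grid cell_size (get_entities_from_grid grid cell_size)

-- ===== LEMMAS AND PROOFS =====

-- A's per-cell transition, abstracted over the (cell, center) pair.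
def pvStep (st : (List (Int × Int)) × (Option (Int × Int)) × (Option (Int × Int)))
    (c : Int × (Int × Int)) : (List (Int × Int)) × (Option (Int × Int)) × (Option (Int × Int)) :=
  if c.1 = 3 then (st.1 ++ [c.2], st.2.1, st.2.2)
  else if c.1 = 4 then (st.1, some c.2, st.2.2)
  else if c.1 = 5 then (st.1, st.2.1, some c.2)
  else st

theorem getLast?_cons_or {α : Type} (a : α) (l : List α) (x : Option α) :
    ((a :: l).getLast?).or x = (l.getLast?).or (some a) := by
  cases l with
  | nil => simp
  | cons b t =>
    obtain ⟨c, hc⟩ := Option.isSome_iff_exists.mp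
      ((List.getLast?_isSome).mpr (List.cons_ne_nil b t))
    simp [List.getLast?_cons_cons, hc]

-- Folding A's transition over any cell list yields the filtered views, last match for 4 and 5.
theorem pvStep_foldl (cells : List (Int × (Int × Int)))
    (z : List (Int × Int)) (s e : Option (Int × Int)) :
    cells.foldl pvStep (z, s, e)
      = (z ++ (cells.filter (fun c => c.1 == 3)).map (fun c => c.2),
         (((cells.filter (fun c => c.1 == 4)).map (fun c => c.2)).getLast?).or s,
         (((cells.filter (fun c => c.1 == 5)).map (fun c => c.2)).getLast?).or e) := by
  induction cells generalizing z s e with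
  | nil => simp
  | cons c rest ih =>
    simp only [List.foldl_cons, List.filter_cons]
    by_cases h3 : c.1 = 3
    · simp [pvStep, h3, ih]
    · by_cases h4 : c.1 = 4
      · simp [pvStep, h4, ih, getLast?_cons_or]
      · by_cases h5 : c.1 = 5
        · simp [pvStep, h5, ih, getLast?_cons_or]
        · simp [pvStep, h3, h4, h5, ih]

-- B's backward first-match search equals the last match of the forward scan.
theorem pvFindLast_eq (grid : List (List Int)) (cell_size n half v : Int) :
    pvFindLast grid cell_size n half v
      = ((((PySem.List.pyRange 0 n 1).flatMap (fun y =>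
            (PySem.List.pyRange 0 n 1).map (fun x =>
              (PySem.List.pyGetD (PySem.List.pyGetD grid y []) x 0,
               (x * cell_size + half, y * cell_size + half))))).filter
            (fun c => c.1 == v)).map (fun c => c.2)).getLast? := by
  unfold pvFindLast
  rw [← List.head?_reverse]
  congr 1
  simp [List.reverse_flatMap, List.filter_flatMap, List.filter_map, List.map_flatMap,
    Function.comp_def]

-- ===== VERDICT (by name: the statement is the Claim_ definition above) =====
theorem get_entities_from_grid_spec : Claim_equal_get_entities_from_grid := by
  intro grid cs _ _
  show get_entities_from_grid grid cs = get_entities_from_grid_alt grid cs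
  show (PySem.List.pyRange 0 (grid.length : Int) 1).foldl (fun st y =>
        (PySem.List.pyRange 0 (grid.length : Int) 1).foldl (fun st x =>
          pvStep st (PySem.List.pyGetD (PySem.List.pyGetD grid y []) x 0,
            (x * cs + PySem.Int.floordiv cs 2, y * cs + PySem.Int.floordiv cs 2))) st)
        ([], none, none)
      = get_entities_from_grid_alt grid cs
  rw [show (fun (st : (List (Int × Int)) × (Option (Int × Int)) × (Option (Int × Int))) (y : Int) =>
        (PySem.List.pyRange 0 (grid.length : Int) 1).foldl (fun st x =>
          pvStep st (PySem.List.pyGetD (PySem.List.pyGetD grid y []) x 0,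
            (x * cs + PySem.Int.floordiv cs 2, y * cs + PySem.Int.floordiv cs 2))) st)
      = (fun st y => ((PySem.List.pyRange 0 (grid.length : Int) 1).map (fun x =>
            (PySem.List.pyGetD (PySem.List.pyGetD grid y []) x 0,
             (x * cs + PySem.Int.floordiv cs 2, y * cs + PySem.Int.floordiv cs 2)))).foldl pvStep st)
      from by funext st y; rw [List.foldl_map]]
  rw [← List.foldl_flatMap]
  rw [pvStep_foldl]
  simp only [get_entities_from_grid_alt, pvFindLast_eq, List.nil_append, Option.or_none]
  simp [List.filter_flatMap, List.filter_map, List.map_flatMap, Function.comp_def]
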